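-- pv_equiv track=rewrite | github.com/maeeri/tira | Wk4/fliptwo.py | solve
-- ===== SOURCE A (Python) =====
-- from collections import deque
--
-- def solve(n,k):
--     l = deque(range(1,n+1))
--     for i in range(k):
--         a = l.popleft()
--         b = l.popleft()
--         l.append(b)
--         l.append(a)
--     return l[0]
-- ===== SOURCE B (Python) =====
-- def solve(n, k):
--     # Closed form: each pair-swap rotation applies the fixed position permutation
--     # sigma(q) = q+2 (q < n-2), sigma(n-2) = 1, sigma(n-1) = 0; the front after k
--     # steps is sigma^k(0)+1, and the cycle of 0 has length n (n even) or (n+1)//2 (n odd).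
--     if k <= 0:
--         return 1
--     if n % 2 == 0:
--         m = k % n
--         half = n // 2
--         if m < half:
--             return 2 * m + 1
--         if m == half:
--             return 2
--         return 2 * (m - half) + 2
--     else:
--         m = k % ((n + 1) // 2)
--         return 2 * m + 1
-- ===== Notes on version B (the rewrite author's own statement) =====
-- stated objective: faster
-- what changed: Replaces the O(k) deque simulation by an O(1) closed form: each pair-swap rotation applies a fixed position permutation whose cycle through position 0 has length n (n even) or (n+1)//2 (n odd), so the front element is computed directly from k mod that cycle length.
-- outside the precondition, e.g. on solve(0, 0): A raises IndexError, B returns 1; on solve(1, 3): A raises IndexError, B returns 1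
import Mathlib
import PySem

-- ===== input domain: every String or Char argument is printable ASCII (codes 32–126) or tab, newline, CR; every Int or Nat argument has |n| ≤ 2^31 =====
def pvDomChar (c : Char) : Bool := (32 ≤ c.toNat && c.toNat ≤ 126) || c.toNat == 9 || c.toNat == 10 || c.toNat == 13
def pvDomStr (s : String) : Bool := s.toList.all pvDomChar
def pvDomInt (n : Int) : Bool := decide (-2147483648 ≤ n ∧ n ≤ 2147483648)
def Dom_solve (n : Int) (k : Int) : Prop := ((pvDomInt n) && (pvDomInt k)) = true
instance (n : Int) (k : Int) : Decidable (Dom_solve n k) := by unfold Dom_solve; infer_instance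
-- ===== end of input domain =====

-- B replaces A's O(k) deque simulation by an O(1) closed form for the front element
-- (the rotation is a fixed position permutation; the cycle of position 0 has length
-- n for even n and (n+1)/2 for odd n).

-- ===== PORT A =====
-- one loop iteration: popleft a, popleft b, append b, append a
def stepA (l : List Int) : List Int :=
  match l with
  | a :: b :: rest => rest ++ [b, a]
  | l => l

def solve (n : Int) (k : Int) : Int :=
  (PySem.List.pyGet?
    ((List.range k.toNat).foldl (fun l _ => stepA l) (PySem.List.pyRange 1 (n + 1) 1)) 0).getD 0

-- ===== PORT B =====
def solve_alt (n : Int) (k : Int) : Int :=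
  if k ≤ 0 then 1
  else if PySem.Int.mod n 2 = 0 then
    if PySem.Int.mod k n < PySem.Int.floordiv n 2 then 2 * PySem.Int.mod k n + 1
    else if PySem.Int.mod k n = PySem.Int.floordiv n 2 then 2
    else 2 * (PySem.Int.mod k n - PySem.Int.floordiv n 2) + 2
  else
    2 * PySem.Int.mod k (PySem.Int.floordiv (n + 1) 2) + 1

-- ===== PRECONDITION & SPEC =====
-- Pre_ excludes exactly the inputs where A raises IndexError: n < 1 (empty deque,
-- l[0] fails) and n = 1 with k ≥ 1 (popleft of the second element fails).
def Pre_solve (n : Int) (k : Int) : Prop := 1 ≤ n ∧ (k ≤ 0 ∨ 2 ≤ n)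
instance (n : Int) (k : Int) : Decidable (Pre_solve n k) := by unfold Pre_solve; infer_instance

def pvWitness_solve : Int × Int := (5, 7)

def Spec_solve (n : Int) (k : Int) (out : Int) : Prop := out = solve_alt n k
instance (n : Int) (k : Int) (out : Int) : Decidable (Spec_solve n k out) := by unfold Spec_solve; infer_instance

-- ===== CLAIM (what is proved, stated in full; the proofs are below) =====
def Claim_equal_solve : Prop := ∀ (n : Int) (k : Int), Dom_solve n k → Pre_solve n k → Spec_solve n k (solve n k)

-- ===== LEMMAS AND PROOFS =====

-- the fixed position permutation applied by one step, on indices 0..N-1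
def sig (N q : ℕ) : ℕ := if q + 2 < N then q + 2 else if q + 2 = N then 1 else 0

theorem foldl_iterate (f : List Int → List Int) (m : ℕ) (init : List Int) :
    (List.range m).foldl (fun l _ => f l) init = f^[m] init := by
  induction m with
  | zero => rfl
  | succ m ih => simp [List.range_succ, Function.iterate_succ_apply', ih]

theorem stepA_length (l : List Int) : (stepA l).length = l.length := by
  match l with
  | a :: b :: rest => simp [stepA]
  | [] => rfl
  | [a] => rfl

theorem sig_lt {N : ℕ} (h2 : 2 ≤ N) (q : ℕ) : sig N q < N := by
  unfold sig; split_ifs <;> omega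

theorem sig_iter_lt {N : ℕ} (h2 : 2 ≤ N) (j q : ℕ) (hq : q < N) : (sig N)^[j] q < N := by
  cases j with
  | zero => simpa
  | succ j => rw [Function.iterate_succ_apply']; exact sig_lt h2 _

theorem stepA_get (M : List Int) (h2 : 2 ≤ M.length) (q : ℕ) (hq : q < M.length) :
    (stepA M)[q]? = M[sig M.length q]? := by
  match M with
  | a :: b :: rest =>
    simp only [stepA, sig, List.length_cons]
    by_cases h1 : q + 2 < rest.length + 1 + 1
    · rw [if_pos h1]
      rw [List.getElem?_append_left (by simpa using h1)]
      simp only [List.getElem?_cons_succ]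
    · rw [if_neg h1]
      by_cases he : q + 2 = rest.length + 1 + 1
      · rw [if_pos he]
        have hq' : q = rest.length := by omega
        subst hq'
        rw [List.getElem?_append_right (by omega)]
        simp
      · rw [if_neg he]
        have hq' : q = rest.length + 1 := by
          simp only [List.length_cons] at hq; omega
        subst hq'
        rw [List.getElem?_append_right (by omega)]
        simp

theorem iter_get (j : ℕ) (M : List Int) (h2 : 2 ≤ M.length) (q : ℕ) (hq : q < M.length) :
    (stepA^[j] M)[q]? = M[(sig M.length)^[j] q]? := by
  induction j generalizing M q with
  | zero => simp
  | succ j ih =>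
    rw [Function.iterate_succ_apply]
    have hlen : (stepA M).length = M.length := stepA_length M
    rw [ih (stepA M) (by omega) q (by omega)]
    rw [hlen]
    rw [stepA_get M h2 _ (sig_iter_lt h2 j q hq)]
    rw [← Function.iterate_succ_apply' (sig M.length) j q]

theorem iter_period (f : ℕ → ℕ) (L : ℕ) (hL : f^[L] 0 = 0) (c r : ℕ) :
    f^[L * c + r] 0 = f^[r] 0 := by
  induction c with
  | zero => simp
  | succ c ih =>
    have he : L * (c + 1) + r = (L * c + r) + L := by ring
    rw [he, Function.iterate_add_apply]
    rw [hL]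
    rw [ih]

theorem even_iter (h : ℕ) (h1 : 1 ≤ h) (r : ℕ) (hr : r ≤ 2 * h) :
    (sig (2 * h))^[r] 0 = if r < h then 2 * r else if r < 2 * h then 2 * (r - h) + 1 else 0 := by
  induction r with
  | zero => simp
  | succ r ih =>
    rw [Function.iterate_succ_apply', ih (by omega)]
    unfold sig
    split_ifs <;> omega

theorem odd_iter (h : ℕ) (_h1 : 1 ≤ h) (r : ℕ) (hr : r ≤ h + 1) :
    (sig (2 * h + 1))^[r] 0 = if r ≤ h then 2 * r else 0 := by
  induction r with
  | zero => simp
  | succ r ih =>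
    rw [Function.iterate_succ_apply', ih (by omega)]
    unfold sig
    split_ifs <;> omega

-- A's result expressed through the permutation power
theorem solve_eq_sig (n k : Int) (h2 : 2 ≤ n) :
    solve n k = 1 + ((sig n.toNat)^[k.toNat] 0 : ℕ) := by
  unfold solve
  have hlen : (PySem.List.pyRange 1 (n + 1) 1).length = n.toNat := by
    rw [PySem.List.length_pyRange_one]; omega
  rw [foldl_iterate, PySem.List.pyGet?_zero,
      iter_get k.toNat _ (by omega) 0 (by omega), hlen]
  have hidx := sig_iter_lt (N := n.toNat) (by omega) k.toNat 0 (by omega)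
  rw [PySem.List.getElem?_pyRange_one, if_pos (by omega : (sig n.toNat)^[k.toNat] 0 < (n + 1 - 1).toNat)]
  simp

-- ===== VERDICT (by name: the statement is the Claim_ definition above) =====
theorem solve_alt_of_nonpos (n k : Int) (hk : k ≤ 0) : solve_alt n k = 1 := by
  unfold solve_alt; rw [if_pos hk]

theorem solve_spec : Claim_equal_solve := by
  intro n k _ hpre
  unfold Spec_solve
  obtain ⟨hn1, hko⟩ := hpre
  by_cases hk : k ≤ 0
  · -- zero iterations: front of [1..n] is 1
    rw [solve_alt_of_nonpos n k hk]
    unfold solve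
    rw [(by omega : k.toNat = 0)]
    simp only [List.range_zero, List.foldl_nil]
    rw [PySem.List.pyGet?_zero, PySem.List.getElem?_pyRange_one,
        if_pos (by omega : 0 < (n + 1 - 1).toNat)]
    simp
  · have h2 : 2 ≤ n := by omega
    obtain ⟨N, rfl⟩ : ∃ N : ℕ, n = (N : Int) := ⟨n.toNat, by omega⟩
    obtain ⟨K, rfl⟩ : ∃ K : ℕ, k = (K : Int) := ⟨k.toNat, by omega⟩
    have hN2 : 2 ≤ N := by exact_mod_cast h2
    have hK1 : 1 ≤ K := by omega
    rw [solve_eq_sig _ _ h2, (by omega : ((N : Int)).toNat = N),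
        (by omega : ((K : Int)).toNat = K)]
    unfold solve_alt
    rw [if_neg hk]
    rw [PySem.Int.mod_eq_emod_of_pos (by omega : (0:Int) < 2)]
    by_cases hev : (N : Int) % 2 = 0
    · -- even n
      rw [if_pos hev]
      obtain ⟨h, rfl, hh1⟩ : ∃ h, N = 2 * h ∧ 1 ≤ h := ⟨N / 2, by omega, by omega⟩
      have hper : (sig (2 * h))^[2 * h] 0 = 0 := by
        rw [even_iter h hh1 (2 * h) le_rfl]; split_ifs <;> omega
      have hmodN : (sig (2 * h))^[K] 0 = (sig (2 * h))^[K % (2 * h)] 0 := by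
        conv_lhs => rw [(Nat.div_add_mod K (2 * h)).symm]
        exact iter_period _ _ hper _ _
      have hrlt : K % (2 * h) < 2 * h := Nat.mod_lt _ (by omega)
      rw [PySem.Int.mod_eq_emod_of_pos (by omega : (0:Int) < ((2 * h : ℕ) : Int))]
      rw [PySem.Int.floordiv_eq_ediv_of_pos (by omega : (0:Int) < 2)]
      rw [hmodN, even_iter h hh1 (K % (2 * h)) (by omega)]
      have hm : ((K : Int)) % ((2 * h : ℕ) : Int) = ((K % (2 * h) : ℕ) : Int) := by
        omega
      have hhalf : ((2 * h : ℕ) : Int) / 2 = ((h : ℕ) : Int) := by omega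
      rw [hm, hhalf]
      generalize K % (2 * h) = R at hrlt ⊢
      split_ifs <;> omega
    · -- odd n
      rw [if_neg hev]
      obtain ⟨h, rfl, hh1⟩ : ∃ h, N = 2 * h + 1 ∧ 1 ≤ h := ⟨N / 2, by omega, by omega⟩
      have hper : (sig (2 * h + 1))^[h + 1] 0 = 0 := by
        rw [odd_iter h hh1 (h + 1) le_rfl]; split_ifs <;> omega
      have hmodL : (sig (2 * h + 1))^[K] 0 = (sig (2 * h + 1))^[K % (h + 1)] 0 := by
        conv_lhs => rw [(Nat.div_add_mod K (h + 1)).symm]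
        exact iter_period _ _ hper _ _
      have hrle : K % (h + 1) ≤ h := by
        have := Nat.mod_lt K (show 0 < h + 1 by omega); omega
      have hfd : PySem.Int.floordiv (((2 * h + 1 : ℕ) : Int) + 1) 2 = ((h + 1 : ℕ) : Int) := by
        rw [PySem.Int.floordiv_eq_ediv_of_pos (by omega : (0:Int) < 2)]
        omega
      rw [hfd, PySem.Int.mod_eq_emod_of_pos (by omega : (0:Int) < ((h + 1 : ℕ) : Int))]
      have hm : ((K : Int)) % ((h + 1 : ℕ) : Int) = ((K % (h + 1) : ℕ) : Int) := by
        omega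
      rw [hm, hmodL, odd_iter h hh1 (K % (h + 1)) (by omega), if_pos hrle]
      push_cast; ring
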